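-- pv_equiv track=rewrite | github.com/easklund/simsallabim | week2/B2.py | excludingPhase
-- ===== SOURCE A (Python) =====
-- def excludingPhase(disList, sets):
--     hit = -1
--     bad = False
--     for i in range(len(sets)):
--         for j in range(len(disList)):
--             if not(sets[i].isdisjoint(disList[j])):
--                 if hit == -1:
--                     hit = j
--                 else:
--                     bad = True
--         if hit != -1 and not(bad):
--             disList[hit] &= sets[i]
--         hit = -1
--         bad = False
--     return disList
-- ===== SOURCE B (Python) =====
-- def excludingPhase(disList, sets):
--     # Inverted index: element -> set of disList indices whose entry contains it,
--     # kept up to date as entries shrink; each set then finds its hit indices by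
--     # direct lookup instead of scanning all of disList, stopping as soon as two
--     # distinct hit indices are known.
--     index = {}
--     for j, d in enumerate(disList):
--         for x in d:
--             index.setdefault(x, set()).add(j)
--     for s in sets:
--         hits = set()
--         for x in s:
--             ids = index.get(x)
--             if ids:
--                 hits |= ids
--                 if len(hits) > 1:
--                     break
--         if len(hits) == 1:
--             j = next(iter(hits))
--             old = disList[j]
--             removed = old - s
--             for x in removed:
--                 index[x].discard(j)
--             old &= s
--     return disList
-- ===== Notes on version B (the rewrite author's own statement) =====
-- stated objective: faster
-- what changed: B builds an inverted index (element -> set of disList indices containing it), kept up to date when an entry shrinks, so each set finds its hit indices by direct lookups on its own elements instead of an isdisjoint scan over every disList entry.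
import Mathlib
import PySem

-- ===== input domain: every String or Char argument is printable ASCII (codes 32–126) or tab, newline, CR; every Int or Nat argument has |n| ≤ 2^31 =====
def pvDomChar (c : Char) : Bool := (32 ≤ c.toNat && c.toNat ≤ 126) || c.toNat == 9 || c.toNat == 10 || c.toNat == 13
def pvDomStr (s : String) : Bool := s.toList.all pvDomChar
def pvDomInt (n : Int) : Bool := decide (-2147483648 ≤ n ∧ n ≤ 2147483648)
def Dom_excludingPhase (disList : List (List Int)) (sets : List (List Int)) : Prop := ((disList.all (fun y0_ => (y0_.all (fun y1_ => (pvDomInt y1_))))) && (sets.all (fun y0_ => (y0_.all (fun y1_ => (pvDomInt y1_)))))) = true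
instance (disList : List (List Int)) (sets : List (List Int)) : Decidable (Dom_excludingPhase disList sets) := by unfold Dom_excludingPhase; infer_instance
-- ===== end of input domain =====

-- B replaces A's per-set scan of every disList entry by an inverted index element -> hit indices,
-- maintained as entries shrink (return-value equivalence; both Pythons mutate disList in place).


-- ===== PORT A =====
-- the inner 'for j in range(len(disList))' loop computing (hit, bad)
def pvScanA (s : List Int) (dl : List (List Int)) : Int × Bool :=
  dl.zipIdx.foldl
    (fun st p =>
      if !(PySem.Set.isdisjoint s p.1) then
        if st.1 == -1 then ((p.2 : Int), st.2) else (st.1, true)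
      else st)
    (-1, false)

-- one iteration of the outer 'for i in range(len(sets))' loop
def pvStepA (dl : List (List Int)) (s : List Int) : List (List Int) :=
  let st := pvScanA s dl
  if st.1 != -1 && !st.2 then
    PySem.List.pySetD dl st.1 (PySem.Set.inter (PySem.List.pyGetD dl st.1 []) s)
  else dl

def excludingPhase (disList : List (List Int)) (sets : List (List Int)) : List (List Int) :=
  sets.foldl pvStepA disList

-- ===== PORT B =====
-- 'for x in d: index.setdefault(x, set()).add(j)'
def pvAddIdx (j : Int) (d : PySem.Dict Int (List Int)) (xs : List Int) : PySem.Dict Int (List Int) :=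
  xs.foldl (fun d x => PySem.Dict.modify d x [] (fun t => PySem.Set.add t j)) d

def pvIndex (disList : List (List Int)) : PySem.Dict Int (List Int) :=
  disList.zipIdx.foldl (fun d p => pvAddIdx (p.2 : Int) d p.1) PySem.Dict.empty

-- Source B's inner 'for x in s' loop accumulating 'hits', with its early 'break'
-- as soon as two distinct hit indices are known
def pvHits (idx : PySem.Dict Int (List Int)) : List Int → PySem.Set Int → PySem.Set Int
  | [], h => h
  | x :: t, h =>
    let ids := PySem.Dict.getD idx x []
    if ids.isEmpty then pvHits idx t h
    else
      let h' := PySem.Set.union h ids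
      if 1 < h'.length then h' else pvHits idx t h'

-- one iteration of Source B's 'for s in sets' loop, state = (disList, index).
-- 'j = next(iter(hits))' is taken from a singleton set, so it is order-independent: headD 0.
def pvStepB (st : List (List Int) × PySem.Dict Int (List Int)) (s : List Int) :
    List (List Int) × PySem.Dict Int (List Int) :=
  let hits : PySem.Set Int := pvHits st.2 s PySem.Set.empty
  if hits.length == 1 then
    let j := hits.headD 0
    let old := PySem.List.pyGetD st.1 j []
    let removed := PySem.Set.diff old s
    let idx' := removed.foldl
      (fun d x => PySem.Dict.modify d x [] (fun t => PySem.Set.discard t j)) st.2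
    (PySem.List.pySetD st.1 j (PySem.Set.inter old s), idx')
  else st

def excludingPhase_alt (disList : List (List Int)) (sets : List (List Int)) : List (List Int) :=
  (sets.foldl pvStepB (disList, pvIndex disList)).1

-- ===== PRECONDITION & SPEC =====
def Spec_excludingPhase (disList : List (List Int)) (sets : List (List Int)) (out : List (List Int)) : Prop := out = excludingPhase_alt disList sets
instance (disList : List (List Int)) (sets : List (List Int)) (out : List (List Int)) : Decidable (Spec_excludingPhase disList sets out) := by unfold Spec_excludingPhase; infer_instance

-- ===== CLAIM (what is proved, stated in full; the proofs are below) =====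
def Claim_equal_excludingPhase : Prop := ∀ (disList : List (List Int)) (sets : List (List Int)), Dom_excludingPhase disList sets → Spec_excludingPhase disList sets (excludingPhase disList sets)

-- ===== LEMMAS AND PROOFS =====

-- the invariant tying the inverted index to disList
def pvInv (dl : List (List Int)) (idx : PySem.Dict Int (List Int)) : Prop :=
  ∀ (x j : Int), j ∈ PySem.Dict.getD idx x [] ↔
    ∃ n : Nat, n < dl.length ∧ j = (n : Int) ∧ x ∈ dl.getD n []

theorem pv_getD_foldl_modify (g : List Int → List Int) (hg : ∀ t, g (g t) = g t) :
    ∀ (l : List Int) (d : PySem.Dict Int (List Int)) (x : Int),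
    (l.foldl (fun d k => PySem.Dict.modify d k [] g) d).getD x [] =
      if x ∈ l then g (d.getD x []) else d.getD x [] := by
  intro l
  induction l with
  | nil => intro d x; simp
  | cons k l ih =>
    intro d x
    simp only [List.foldl_cons, ih, PySem.Dict.getD_modify, List.mem_cons]
    by_cases hxl : x ∈ l <;> by_cases hxk : x = k <;> simp [hxl, hxk, hg]

theorem pv_add_idem (t : List Int) (j : Int) :
    PySem.Set.add (PySem.Set.add t j) j = PySem.Set.add t j := by
  by_cases h : j ∈ t <;>
    simp [PySem.Set.add, PySem.Set.contains, h, List.elem_eq_contains]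

theorem pv_discard_idem (t : List Int) (j : Int) :
    PySem.Set.discard (PySem.Set.discard t j) j = PySem.Set.discard t j := by
  simp [PySem.Set.discard, List.filter_filter]

theorem pv_getD_pvAddIdx (j : Int) (xs : List Int) (d : PySem.Dict Int (List Int)) (x : Int) :
    (pvAddIdx j d xs).getD x [] =
      if x ∈ xs then PySem.Set.add (d.getD x []) j else d.getD x [] :=
  pv_getD_foldl_modify _ (fun t => pv_add_idem t j) xs d x

theorem pv_index_mem :
    ∀ (l : List (List Int)) (k : Nat) (d : PySem.Dict Int (List Int)) (x j : Int),
    j ∈ ((l.zipIdx k).foldl (fun d p => pvAddIdx (p.2 : Int) d p.1) d).getD x [] ↔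
      (j ∈ d.getD x [] ∨ ∃ n : Nat, n < l.length ∧ j = ((k + n : Nat) : Int) ∧ x ∈ l.getD n []) := by
  intro l
  induction l with
  | nil => simp
  | cons a l ih =>
    intro k d x j
    simp only [List.zipIdx_cons, List.foldl_cons, ih (k + 1)]
    rw [pv_getD_pvAddIdx]
    constructor
    · rintro (h | ⟨n, hn, hj, hx⟩)
      · by_cases hxa : x ∈ a
        · simp only [hxa, if_pos] at h
          rcases (PySem.Set.mem_add _ _ _).1 h with h | h
          · exact Or.inl h
          · exact Or.inr ⟨0, by simp, by simpa using h, by simpa using hxa⟩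
        · simp only [hxa, if_neg, not_false_iff] at h
          exact Or.inl h
      · exact Or.inr ⟨n + 1, by simpa using hn, by push_cast; push_cast at hj; omega, by simpa using hx⟩
    · rintro (h | ⟨n, hn, hj, hx⟩)
      · refine Or.inl ?_
        by_cases hxa : x ∈ a <;> simp [hxa, PySem.Set.mem_add, h]
      · match n with
        | 0 =>
          refine Or.inl ?_
          simp only [List.getD_cons_zero] at hx
          simp [hx, PySem.Set.mem_add]
          right; push_cast at hj ⊢; omega
        | n + 1 =>
          refine Or.inr ⟨n, by simpa using hn, by push_cast; push_cast at hj; omega, by simpa using hx⟩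

theorem pv_inv_index (dl : List (List Int)) : pvInv dl (pvIndex dl) := by
  intro x j
  unfold pvIndex
  rw [pv_index_mem dl 0 PySem.Dict.empty x j]
  simp [PySem.Dict.empty, PySem.Dict.getD, PySem.Dict.get?]

-- characterization of the (hit, bad) scan
theorem pv_scan_ne (s : List Int) :
    ∀ (l : List (List Int)) (k : Nat) (j : Int) (b : Bool), ¬ (j = -1) →
    (l.zipIdx k).foldl
      (fun st p =>
        if !(PySem.Set.isdisjoint s p.1) then
          if st.1 == -1 then ((p.2 : Int), st.2) else (st.1, true)
        else st) (j, b)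
    = (j, b || l.any (fun d => !(PySem.Set.isdisjoint s d))) := by
  intro l
  induction l with
  | nil => intro k j b h; simp
  | cons a l ih =>
    intro k j b h
    simp only [List.zipIdx_cons, List.foldl_cons, List.any_cons]
    by_cases ha : PySem.Set.isdisjoint s a = true
    · simp only [ha, Bool.not_true, if_neg, Bool.false_eq_true, not_false_iff]
      rw [ih (k + 1) j b h]
      simp [ha]
    · simp only [Bool.not_eq_true] at ha
      have hje : (j == -1) = false := by simp [h]
      simp only [ha, Bool.not_false, if_pos, hje, Bool.false_eq_true, if_neg, not_false_iff]
      rw [ih (k + 1) j true h]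
      simp [ha]

theorem pv_scan_eq (s : List Int) :
    ∀ (l : List (List Int)) (k : Nat),
    (l.zipIdx k).foldl
      (fun st p =>
        if !(PySem.Set.isdisjoint s p.1) then
          if st.1 == -1 then ((p.2 : Int), st.2) else (st.1, true)
        else st) (-1, false)
    = (match l.findIdx? (fun d => !(PySem.Set.isdisjoint s d)) with
       | none => ((-1 : Int), false)
       | some i => (((k + i : Nat) : Int), (l.drop (i + 1)).any (fun d => !(PySem.Set.isdisjoint s d)))) := by
  intro l
  induction l with
  | nil => intro k; simp
  | cons a l ih =>
    intro k
    simp only [List.zipIdx_cons, List.foldl_cons]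
    by_cases ha : PySem.Set.isdisjoint s a = true
    · simp only [ha, Bool.not_true, if_neg, Bool.false_eq_true, not_false_iff]
      rw [ih (k + 1)]
      rw [List.findIdx?_cons]
      simp only [ha, Bool.not_true, if_neg, Bool.false_eq_true, not_false_iff]
      cases h : l.findIdx? (fun d => !(PySem.Set.isdisjoint s d)) with
      | none => simp [h]
      | some i =>
        simp only [h, Option.map_some]
        have hkadd : k + 1 + i = k + (i + 1) := by omega
        simp only [List.drop_succ_cons, hkadd]
    · simp only [Bool.not_eq_true] at ha
      have : ((-1 : Int) == -1) = true := by decide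
      simp only [ha, Bool.not_false, if_pos, this, if_pos]
      have hk : ¬ ((k : Int) = -1) := by omega
      rw [pv_scan_ne s l (k + 1) (k : Int) false hk]
      rw [List.findIdx?_cons]
      simp [ha]

-- membership in the accumulated 'hits' set
theorem pv_mem_hits (idx : PySem.Dict Int (List Int)) :
    ∀ (l : List Int) (h : List Int) (j : Int),
    j ∈ l.foldl (fun h x =>
          let ids := PySem.Dict.getD idx x []
          if ids.isEmpty then h else PySem.Set.union h ids) h ↔
      (j ∈ h ∨ ∃ x ∈ l, j ∈ idx.getD x []) := by
  intro l
  induction l with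
  | nil => simp
  | cons a l ih =>
    intro h j
    simp only [List.foldl_cons]
    rw [ih]
    by_cases he : (PySem.Dict.getD idx a []).isEmpty = true
    · have he' := List.isEmpty_iff.mp he
      simp only [he, if_true, List.mem_cons, he']
      constructor
      · rintro (h1 | ⟨x, hx, hj⟩)
        · exact Or.inl h1
        · exact Or.inr ⟨x, Or.inr hx, hj⟩
      · rintro (h1 | ⟨x, rfl | hx, hj⟩)
        · exact Or.inl h1
        · rw [he'] at hj; simp at hj
        · exact Or.inr ⟨x, hx, hj⟩
    · simp only [he, if_false, Bool.false_eq_true, List.mem_cons]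
      constructor
      · rintro (h1 | ⟨x, hx, hj⟩)
        · rcases (PySem.Set.mem_union _ _ _).1 h1 with h2 | h2
          · exact Or.inl h2
          · exact Or.inr ⟨a, Or.inl rfl, h2⟩
        · exact Or.inr ⟨x, Or.inr hx, hj⟩
      · rintro (h1 | ⟨x, rfl | hx, hj⟩)
        · exact Or.inl ((PySem.Set.mem_union _ _ _).2 (Or.inl h1))
        · exact Or.inl ((PySem.Set.mem_union _ _ _).2 (Or.inr hj))
        · exact Or.inr ⟨x, hx, hj⟩

theorem pv_nodup_hits (idx : PySem.Dict Int (List Int)) :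
    ∀ (l : List Int) (h : List Int), h.Nodup →
    (l.foldl (fun h x =>
        let ids := PySem.Dict.getD idx x []
        if ids.isEmpty then h else PySem.Set.union h ids) h).Nodup := by
  intro l
  induction l with
  | nil => intro h hh; simpa
  | cons a l ih =>
    intro h hh
    simp only [List.foldl_cons]
    apply ih
    by_cases he : (PySem.Dict.getD idx a []).isEmpty <;>
      simp [he, PySem.Set.nodup_union, hh]

-- not-disjoint as an existential
theorem pv_not_disjoint (s t : List Int) :
    (!(PySem.Set.isdisjoint s t)) = true ↔ ∃ x ∈ s, x ∈ t := by
  simp only [Bool.not_eq_true', Bool.not_eq_true]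
  constructor
  · intro h
    by_contra hc
    push_neg at hc
    have := (PySem.Set.isdisjoint_iff (s := s) (t := t)).2 hc
    simp [this] at h
  · intro ⟨x, hx, hxt⟩ 
    by_contra hc
    simp only [Bool.not_eq_false] at hc
    exact ((PySem.Set.isdisjoint_iff (s := s) (t := t)).1 hc x hx) hxt

-- small getD helpers
theorem pv_getD_eq (dl : List (List Int)) (n : Nat) (hn : n < dl.length) :
    dl.getD n [] = dl[n] := by
  simp [List.getD_eq_getElem?_getD, List.getElem?_eq_getElem hn]

theorem pv_getD_mem (dl : List (List Int)) (n : Nat) (hn : n < dl.length) :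
    dl.getD n [] ∈ dl := by
  rw [pv_getD_eq dl n hn]; exact List.getElem_mem hn

theorem pv_getD_set (dl : List (List Int)) (i n : Nat) (v : List Int) (hi : i < dl.length) :
    (dl.set i v).getD n [] = if n = i then v else dl.getD n [] := by
  by_cases h : n = i
  · subst h; simp [List.getD_eq_getElem?_getD, List.getElem?_set, hi]
  · rw [List.getD_eq_getElem?_getD, List.getD_eq_getElem?_getD, List.getElem?_set,
        if_neg (fun h' => h h'.symm)]
    rw [if_neg h]

theorem pv_len_add (h : PySem.Set Int) (x : Int) : h.length ≤ (PySem.Set.add h x).length := by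
  simp only [PySem.Set.add]
  split <;> simp

theorem pv_len_union (h ids : PySem.Set Int) : h.length ≤ (PySem.Set.union h ids).length := by
  simp only [PySem.Set.union, PySem.Set.update]
  induction ids generalizing h with
  | nil => simp
  | cons a t ih => exact le_trans (pv_len_add h a) (ih _)

theorem pv_full_len_le (idx : PySem.Dict Int (List Int)) :
    ∀ (s : List Int) (h : PySem.Set Int),
    h.length ≤ (s.foldl (fun h x =>
      let ids := PySem.Dict.getD idx x []
      if ids.isEmpty then h else PySem.Set.union h ids) h).length := by
  intro s
  induction s with
  | nil => simp
  | cons a t ih =>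
    intro h
    simp only [List.foldl_cons]
    by_cases he : (PySem.Dict.getD idx a []).isEmpty
    · simp only [he, if_true]
      exact ih h
    · simp only [he, if_false, Bool.false_eq_true]
      exact le_trans (pv_len_union h _) (ih _)

-- the early 'break' never changes whether exactly one index was hit, nor which one
theorem pv_hits_spec (idx : PySem.Dict Int (List Int)) :
    ∀ (s : List Int) (h : PySem.Set Int),
    pvHits idx s h = s.foldl (fun h x =>
        let ids := PySem.Dict.getD idx x []
        if ids.isEmpty then h else PySem.Set.union h ids) h ∨
      (1 < (pvHits idx s h).length ∧ 1 < (s.foldl (fun h x =>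
        let ids := PySem.Dict.getD idx x []
        if ids.isEmpty then h else PySem.Set.union h ids) h).length) := by
  intro s
  induction s with
  | nil => intro h; exact Or.inl rfl
  | cons a t ih =>
    intro h
    simp only [pvHits, List.foldl_cons]
    by_cases he : (PySem.Dict.getD idx a []).isEmpty
    · simp only [he, if_true]
      exact ih h
    · simp only [he, if_false, Bool.false_eq_true]
      by_cases hl : 1 < (PySem.Set.union h (PySem.Dict.getD idx a [])).length
      · rw [if_pos hl]
        exact Or.inr ⟨hl, lt_of_lt_of_le hl (pv_full_len_le idx t _)⟩
      · rw [if_neg hl]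
        exact ih _

-- the central per-step lemma
theorem pv_step (dl : List (List Int)) (idx : PySem.Dict Int (List Int)) (s : List Int)
    (hInv : pvInv dl idx) :
    (pvStepB (dl, idx) s).1 = pvStepA dl s ∧ pvInv (pvStepB (dl, idx) s).1 (pvStepB (dl, idx) s).2 := by
  have hscan : pvScanA s dl =
      (match dl.findIdx? (fun d => !(PySem.Set.isdisjoint s d)) with
       | none => ((-1 : Int), false)
       | some i => (((i : Nat) : Int), (dl.drop (i + 1)).any (fun d => !(PySem.Set.isdisjoint s d)))) := by
    unfold pvScanA
    rw [pv_scan_eq s dl 0]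
    cases h : dl.findIdx? (fun d => !(PySem.Set.isdisjoint s d)) <;> simp
  have memH : ∀ j : Int,
      j ∈ s.foldl (fun h x =>
            let ids := PySem.Dict.getD idx x []
            if ids.isEmpty then h else PySem.Set.union h ids) PySem.Set.empty ↔
        ∃ n : Nat, n < dl.length ∧ j = (n : Int) ∧ ∃ x ∈ s, x ∈ dl.getD n [] := by
    intro j
    rw [pv_mem_hits]
    constructor
    · rintro (h | ⟨x, hx, hj⟩)
      · simp [PySem.Set.empty] at h
      · rcases (hInv x j).1 hj with ⟨n, hn, rfl, hxn⟩
        exact ⟨n, hn, rfl, x, hx, hxn⟩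
    · rintro ⟨n, hn, rfl, x, hx, hxn⟩
      exact Or.inr ⟨x, hx, (hInv x _).2 ⟨n, hn, rfl, hxn⟩⟩
  have nodupH : (s.foldl (fun h x =>
        let ids := PySem.Dict.getD idx x []
        if ids.isEmpty then h else PySem.Set.union h ids) PySem.Set.empty).Nodup :=
    pv_nodup_hits idx s PySem.Set.empty (by simp [PySem.Set.empty])
  cases hfind : dl.findIdx? (fun d => !(PySem.Set.isdisjoint s d)) with
  | none =>
    have hnohit := List.findIdx?_eq_none_iff.mp hfind
    have hemp : s.foldl (fun h x =>
        let ids := PySem.Dict.getD idx x []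
        if ids.isEmpty then h else PySem.Set.union h ids) PySem.Set.empty = [] := by
      rw [List.eq_nil_iff_forall_not_mem]
      intro j hj
      rcases (memH j).1 hj with ⟨n, hn, rfl, x, hx, hxn⟩
      have h1 := hnohit _ (pv_getD_mem dl n hn)
      have h2 := (pv_not_disjoint s (dl.getD n [])).2 ⟨x, hx, hxn⟩
      rw [h1] at h2
      exact Bool.false_ne_true h2
    have hempB : pvHits idx s PySem.Set.empty = [] := by
      rcases pv_hits_spec idx s PySem.Set.empty with h | ⟨_, h2⟩
      · rw [h, hemp]
      · rw [hemp] at h2; simp at h2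
    have hB : pvStepB (dl, idx) s = (dl, idx) := by
      unfold pvStepB
      simp only [hempB]
      simp
    have hA : pvStepA dl s = dl := by
      unfold pvStepA
      rw [hscan]
      simp only [hfind]
      simp
    rw [hB, hA]
    exact ⟨rfl, hInv⟩
  | some i =>
    obtain ⟨hi, hpi, hbefore⟩ := List.findIdx?_eq_some_iff_getElem.mp hfind
    have hHiti : ((i : Nat) : Int) ∈ s.foldl (fun h x =>
        let ids := PySem.Dict.getD idx x []
        if ids.isEmpty then h else PySem.Set.union h ids) PySem.Set.empty := by
      refine (memH _).2 ⟨i, hi, rfl, ?_⟩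
      rw [pv_getD_eq dl i hi]
      exact (pv_not_disjoint s dl[i]).1 hpi
    cases hafter : (dl.drop (i + 1)).any (fun d => !(PySem.Set.isdisjoint s d)) with
    | true =>
      -- at least two hit indices: length ≠ 1, both sides leave the state unchanged
      obtain ⟨d, hd, hpd⟩ := List.any_eq_true.mp hafter
      obtain ⟨m, hm, rfl⟩ := List.mem_iff_getElem.mp hd
      have hm' : i + 1 + m < dl.length := by
        have := hm; simp [List.length_drop] at this; omega
      have hHitm : ((i + 1 + m : Nat) : Int) ∈ s.foldl (fun h x =>
          let ids := PySem.Dict.getD idx x []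
          if ids.isEmpty then h else PySem.Set.union h ids) PySem.Set.empty := by
        refine (memH _).2 ⟨i + 1 + m, hm', rfl, ?_⟩
        rw [pv_getD_eq dl _ hm']
        rw [List.getElem_drop] at hpd
        exact (pv_not_disjoint s _).1 hpd
      have hlen : ¬ ((s.foldl (fun h x =>
          let ids := PySem.Dict.getD idx x []
          if ids.isEmpty then h else PySem.Set.union h ids) PySem.Set.empty).length = 1) := by
        intro h1
        obtain ⟨a, ha⟩ := List.length_eq_one_iff.mp h1
        rw [ha] at hHiti hHitm
        simp at hHiti hHitm
        omega
      have hlenB : ¬ ((pvHits idx s PySem.Set.empty).length = 1) := by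
        rcases pv_hits_spec idx s PySem.Set.empty with h | ⟨h1, _⟩
        · rw [h]; exact hlen
        · omega
      have hB : pvStepB (dl, idx) s = (dl, idx) := by
        unfold pvStepB
        simp only [beq_iff_eq]
        rw [if_neg hlenB]
      have hA : pvStepA dl s = dl := by
        unfold pvStepA
        rw [hscan]
        simp only [hfind, hafter]
        simp
      rw [hB, hA]
      exact ⟨rfl, hInv⟩
    | false =>
      -- exactly one hit index i: both sides intersect entry i, and the index stays in sync
      have hnoafter := List.any_eq_false.mp hafter
      have hOnly : ∀ j : Int, j ∈ s.foldl (fun h x =>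
          let ids := PySem.Dict.getD idx x []
          if ids.isEmpty then h else PySem.Set.union h ids) PySem.Set.empty ↔ j = ((i : Nat) : Int) := by
        intro j
        constructor
        · intro hj
          rcases (memH j).1 hj with ⟨n, hn, rfl, x, hx, hxn⟩
          have hpn : (!(PySem.Set.isdisjoint s (dl.getD n []))) = true :=
            (pv_not_disjoint s _).2 ⟨x, hx, hxn⟩
          rcases lt_trichotomy n i with h | h | h
          · exact absurd (by rw [pv_getD_eq dl n hn] at hpn; exact hpn) (hbefore n h)
          · rw [h]
          · exfalso
            have hmem : dl.getD n [] ∈ dl.drop (i + 1) := by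
              rw [pv_getD_eq dl n hn]
              have hlt : n - (i + 1) < (dl.drop (i + 1)).length := by
                simp [List.length_drop]; omega
              have : (dl.drop (i + 1))[n - (i + 1)] = dl[n] := by
                rw [List.getElem_drop]
                congr 1
                omega
              rw [← this]
              exact List.getElem_mem hlt
            exact hnoafter _ hmem hpn
        · rintro rfl
          exact hHiti
      have hsingle : s.foldl (fun h x =>
          let ids := PySem.Dict.getD idx x []
          if ids.isEmpty then h else PySem.Set.union h ids) PySem.Set.empty = [((i : Nat) : Int)] := by
        generalize hH : s.foldl (fun h x =>
          let ids := PySem.Dict.getD idx x []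
          if ids.isEmpty then h else PySem.Set.union h ids) PySem.Set.empty = hits at hOnly nodupH hHiti
        match hits, nodupH with
        | [], _ => simp at hHiti
        | a :: t, hnd =>
          have ha : a = ((i : Nat) : Int) := (hOnly a).1 (by simp)
          have ht : t = [] := by
            match t, hnd with
            | [], _ => rfl
            | b :: t', hnd' =>
              have hb : b = ((i : Nat) : Int) := (hOnly b).1 (by simp)
              rw [List.nodup_cons] at hnd'
              exact absurd (by rw [ha, ← hb]; simp : a ∈ b :: t') hnd'.1
          rw [ha, ht]
      have hB : pvStepB (dl, idx) s =
          (PySem.List.pySetD dl ((i : Nat) : Int)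
             (PySem.Set.inter (PySem.List.pyGetD dl ((i : Nat) : Int) []) s),
           (PySem.Set.diff (PySem.List.pyGetD dl ((i : Nat) : Int) []) s).foldl
             (fun d x => PySem.Dict.modify d x []
                (fun t => PySem.Set.discard t ((i : Nat) : Int))) idx) := by
        have hsingleB : pvHits idx s PySem.Set.empty = [((i : Nat) : Int)] := by
          rcases pv_hits_spec idx s PySem.Set.empty with h | ⟨_, h2⟩
          · rw [h, hsingle]
          · rw [hsingle] at h2; simp at h2
        unfold pvStepB
        simp only [hsingleB]
        simp
      have hA : pvStepA dl s =
          PySem.List.pySetD dl ((i : Nat) : Int)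
            (PySem.Set.inter (PySem.List.pyGetD dl ((i : Nat) : Int) []) s) := by
        unfold pvStepA
        rw [hscan]
        simp only [hfind, hafter]
        have hne : (((i : Nat) : Int) != -1) = true := by simp
        simp [hne]
      refine ⟨by rw [hB, hA], ?_⟩
      rw [hB]
      -- the updated state still satisfies the invariant
      intro x j
      simp only [PySem.List.pySetD_natCast, PySem.List.pyGetD_natCast]
      rw [pv_getD_foldl_modify (fun t => PySem.Set.discard t ((i : Nat) : Int))
            (fun t => pv_discard_idem t _)]
      have hlenset : (dl.set i (PySem.Set.inter (dl.getD i []) s)).length = dl.length := by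
        simp
      by_cases hrem : x ∈ PySem.Set.diff (dl.getD i []) s
      · have hx := (PySem.Set.mem_diff _ _ _).1 hrem
        simp only [hrem, if_true]
        rw [PySem.Set.mem_discard]
        constructor
        · rintro ⟨hj, hji⟩
          rcases (hInv x j).1 hj with ⟨n, hn, rfl, hxn⟩
          refine ⟨n, by omega, rfl, ?_⟩
          rw [pv_getD_set dl i n _ hi]
          have hni : ¬ (n = i) := by intro h; exact hji (by rw [h])
          rw [if_neg hni]; exact hxn
        · rintro ⟨n, hn, rfl, hxn⟩
          rw [hlenset] at hn
          rw [pv_getD_set dl i n _ hi] at hxn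
          by_cases hni : n = i
          · exfalso
            rw [if_pos hni] at hxn
            exact hx.2 ((PySem.Set.mem_inter _ _ _).1 hxn).2
          · rw [if_neg hni] at hxn
            refine ⟨(hInv x _).2 ⟨n, hn, rfl, hxn⟩, ?_⟩
            intro h
            exact hni (by exact_mod_cast h)
      · simp only [hrem, if_false]
        rw [hInv x j]
        constructor
        · rintro ⟨n, hn, rfl, hxn⟩
          refine ⟨n, by omega, rfl, ?_⟩
          rw [pv_getD_set dl i n _ hi]
          by_cases hni : n = i
          · subst hni
            rw [if_pos rfl, PySem.Set.mem_inter]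
            refine ⟨hxn, ?_⟩
            by_contra hxs
            exact hrem ((PySem.Set.mem_diff _ _ _).2 ⟨hxn, hxs⟩)
          · rw [if_neg hni]; exact hxn
        · rintro ⟨n, hn, rfl, hxn⟩
          rw [hlenset] at hn
          rw [pv_getD_set dl i n _ hi] at hxn
          by_cases hni : n = i
          · subst hni
            rw [if_pos rfl, PySem.Set.mem_inter] at hxn
            exact ⟨n, hn, rfl, hxn.1⟩
          · rw [if_neg hni] at hxn
            exact ⟨n, hn, rfl, hxn⟩

theorem pv_main :
    ∀ (sets : List (List Int)) (dl : List (List Int)) (idx : PySem.Dict Int (List Int)),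
    pvInv dl idx → (sets.foldl pvStepB (dl, idx)).1 = sets.foldl pvStepA dl := by
  intro sets
  induction sets with
  | nil => intro dl idx h; rfl
  | cons s sets ih =>
    intro dl idx h
    obtain ⟨heq, hinv⟩ := pv_step dl idx s h
    simp only [List.foldl_cons]
    have hpair : pvStepB (dl, idx) s = ((pvStepB (dl, idx) s).1, (pvStepB (dl, idx) s).2) := rfl
    rw [hpair, ih _ _ hinv, heq]

-- ===== VERDICT (by name: the statement is the Claim_ definition above) =====
theorem excludingPhase_spec : Claim_equal_excludingPhase := by
  intro disList sets _
  unfold Spec_excludingPhase excludingPhase excludingPhase_alt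
  exact (pv_main sets disList (pvIndex disList) (pv_inv_index disList)).symm
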